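-- pv_equiv track=rewrite | github.com/andresparradev/training-camp-argentina | day3/K.py | solve
-- ===== SOURCE A (Python) =====
-- def solve(x, y, s):
--     myX = 0
--     myY = 0
--     r = 0
--     l = 0
--     u = 0
--     d = 0
--
--     for i in s:
--         if i == 'L':
--             myX -= 1
--             l += 1
--         elif i == 'R':
--             myX += 1
--             r += 1
--         elif i == 'U':
--             myY += 1
--             u += 1
--         elif i == 'D':
--             myY -= 1
--             d += 1
--
--     if x == myX and y == myY:
--         return 'YES'
--
--     yesX = False
--     yesY = False
--     for i in range(len(s)):
--         if r-l == x:
--             yesX = True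
--
--         if u-l == y:
--             yesY = True
--
--         r -= 1
--         u -= 1
--
--     if yesY and yesX:
--         return 'YES'
--
--     return 'NO'
-- ===== SOURCE B (Python) =====
-- def solve(x, y, s):
--     r = l = u = d = 0
--     for ch in s:
--         if ch == 'R':
--             r += 1
--         elif ch == 'L':
--             l += 1
--         elif ch == 'U':
--             u += 1
--         elif ch == 'D':
--             d += 1
--     if x == r - l and y == u - d:
--         return 'YES'
--     n = len(s)
--     if n >= 1 and r - l - (n - 1) <= x <= r - l and u - d - (n - 1) <= y <= u - d:
--         return 'YES'
--     return 'NO'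
-- ===== Notes on version B (the rewrite author's own statement) =====
-- stated objective: faster
-- what changed: B does one counting pass and replaces A's second O(n) scan over range(len(s)) (which repeatedly decrements r and u to test r-l==x and u-l==y) with O(1) closed-form interval tests, removing one of A's two Python-level loops.
-- intended difference: On inputs where the net displacement does not already match, x lies in [r-l-(n-1), r-l], and y lies in exactly one of the intervals [u-l-(n-1), u-l] and [u-d-(n-1), u-d] with l != d, A's answer uses the evident typo u-l (the x-test mirrors r-l, so the y-test should use the down-count d, not the left-count l) while B uses the intended u-d; e.g. on (-1,-1,'LU') A returns 'YES' and B returns 'NO'. — e.g. on solve(-1, -1, "LU"): A returns "YES", B returns "NO"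
import Mathlib
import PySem

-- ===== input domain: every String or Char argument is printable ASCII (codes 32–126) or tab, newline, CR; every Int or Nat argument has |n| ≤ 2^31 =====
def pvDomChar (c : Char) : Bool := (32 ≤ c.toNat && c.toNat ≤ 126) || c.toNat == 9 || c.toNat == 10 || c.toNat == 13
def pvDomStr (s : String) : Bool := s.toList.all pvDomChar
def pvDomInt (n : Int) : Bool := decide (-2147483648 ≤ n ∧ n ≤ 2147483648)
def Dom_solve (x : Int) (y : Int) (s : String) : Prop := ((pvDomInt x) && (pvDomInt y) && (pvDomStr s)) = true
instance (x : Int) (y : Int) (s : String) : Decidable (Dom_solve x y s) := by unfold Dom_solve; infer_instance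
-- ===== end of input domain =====

-- B replaces A's second per-character scan with closed-form interval tests and uses the
-- intended down-count d (not l) for the vertical test; the difference is stated in D_solve.

-- ===== PORT A =====
def solveStepA (st : Int × Int × Int × Int × Int × Int) (i : Char) :
    Int × Int × Int × Int × Int × Int :=
  match st with
  | (myX, myY, r, l, u, d) =>
    if i = 'L' then (myX - 1, myY, r, l + 1, u, d)
    else if i = 'R' then (myX + 1, myY, r + 1, l, u, d)
    else if i = 'U' then (myX, myY + 1, r, l, u + 1, d)
    else if i = 'D' then (myX, myY - 1, r, l, u, d + 1)
    else (myX, myY, r, l, u, d)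

def solveStep2 (x : Int) (y : Int) (l : Int) (st : Bool × Bool × Int × Int) (_i : Int) :
    Bool × Bool × Int × Int :=
  match st with
  | (yesX, yesY, r, u) =>
    ((if r - l = x then true else yesX), (if u - l = y then true else yesY), r - 1, u - 1)

def solve (x : Int) (y : Int) (s : String) : String :=
  match s.toList.foldl solveStepA (0, 0, 0, 0, 0, 0) with
  | (myX, myY, r, l, u, _d) =>
    if x = myX ∧ y = myY then "YES"
    else
      match (PySem.List.pyRange 0 (PySem.Str.len s) 1).foldl (solveStep2 x y l)
          (false, false, r, u) with
      | (yesX, yesY, _r, _u) => if yesY = true ∧ yesX = true then "YES" else "NO"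

-- ===== PORT B =====
def solveStepB (c : Int × Int × Int × Int) (ch : Char) : Int × Int × Int × Int :=
  match c with
  | (r, l, u, d) =>
    if ch = 'R' then (r + 1, l, u, d)
    else if ch = 'L' then (r, l + 1, u, d)
    else if ch = 'U' then (r, l, u + 1, d)
    else if ch = 'D' then (r, l, u, d + 1)
    else (r, l, u, d)

def solve_alt (x : Int) (y : Int) (s : String) : String :=
  match s.toList.foldl solveStepB (0, 0, 0, 0) with
  | (r, l, u, d) =>
    if x = r - l ∧ y = u - d then "YES"
    else
      let n : Int := PySem.Str.len s
      if 1 ≤ n ∧ r - l - (n - 1) ≤ x ∧ x ≤ r - l ∧ u - d - (n - 1) ≤ y ∧ y ≤ u - d then "YES"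
      else "NO"

-- ===== PRECONDITION & SPEC =====
-- A's second (reachability-window) test uses the evident typo u-l where the mirrored x-test
-- uses r-l, so the intended vertical expression is u-d; on inputs where the net displacement
-- does not already match, x lies in A's horizontal window, and y lies in exactly one of the
-- windows [u-l-(n-1), u-l] and [u-d-(n-1), u-d], A answers "YES"/"NO" by the typo while B
-- gives the intended answer using u-d.
def pvC (s : String) (c : Char) : Int := s.toList.count c
def pvIn (k n : Int) : Prop := 0 ≤ k ∧ k < n
def D_solve (x : Int) (y : Int) (s : String) : Prop :=
  ¬(x = pvC s 'R' - pvC s 'L' ∧ y = pvC s 'U' - pvC s 'D') ∧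
  pvIn (pvC s 'R' - pvC s 'L' - x) s.toList.length ∧
  ¬(pvIn (pvC s 'U' - pvC s 'L' - y) s.toList.length ↔ pvIn (pvC s 'U' - pvC s 'D' - y) s.toList.length)
instance (x : Int) (y : Int) (s : String) : Decidable (D_solve x y s) := by
  unfold D_solve pvIn; infer_instance

def Spec_solve (x : Int) (y : Int) (s : String) (out : String) : Prop :=
  ¬ D_solve x y s → out = solve_alt x y s
instance (x : Int) (y : Int) (s : String) (out : String) : Decidable (Spec_solve x y s out) := by
  unfold Spec_solve; infer_instance

def pvDiffWitness_solve : Int × Int × String := (-1, -1, "LU")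
def pvDiffWitnessOut_solve : String × String := ("YES", "NO")

-- ===== CLAIM (what is proved, stated in full; the proofs are below) =====
def Claim_unchanged_solve : Prop :=
  ∀ (x : Int) (y : Int) (s : String), Dom_solve x y s → Spec_solve x y s (solve x y s)
def Claim_changed_solve : Prop :=
  Dom_solve (pvDiffWitness_solve.1) (pvDiffWitness_solve.2.1) (pvDiffWitness_solve.2.2) ∧
  D_solve (pvDiffWitness_solve.1) (pvDiffWitness_solve.2.1) (pvDiffWitness_solve.2.2) ∧
  solve (pvDiffWitness_solve.1) (pvDiffWitness_solve.2.1) (pvDiffWitness_solve.2.2) = pvDiffWitnessOut_solve.1 ∧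
  solve_alt (pvDiffWitness_solve.1) (pvDiffWitness_solve.2.1) (pvDiffWitness_solve.2.2) = pvDiffWitnessOut_solve.2 ∧
  pvDiffWitnessOut_solve.1 ≠ pvDiffWitnessOut_solve.2
def Claim_exact_solve : Prop :=
  ∀ (x : Int) (y : Int) (s : String), Dom_solve x y s → D_solve x y s →
    solve x y s ≠ solve_alt x y s

-- ===== LEMMAS AND PROOFS =====

theorem foldl_stepA (cs : List Char) :
    ∀ mx my r l u d : Int,
      cs.foldl solveStepA (mx, my, r, l, u, d) =
        (mx + (cs.count 'R' : Int) - (cs.count 'L' : Int),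
         my + (cs.count 'U' : Int) - (cs.count 'D' : Int),
         r + (cs.count 'R' : Int), l + (cs.count 'L' : Int),
         u + (cs.count 'U' : Int), d + (cs.count 'D' : Int)) := by
  induction cs with
  | nil => intro mx my r l u d; simp
  | cons c t ih =>
    intro mx my r l u d
    simp only [List.foldl_cons, solveStepA, List.count_cons]
    split_ifs with h1 h2 h3 h4 <;> rw [ih] <;> subst_eqs <;> simp_all <;> omega

theorem foldl_stepB (cs : List Char) :
    ∀ r l u d : Int,
      cs.foldl solveStepB (r, l, u, d) =
        (r + (cs.count 'R' : Int), l + (cs.count 'L' : Int),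
         u + (cs.count 'U' : Int), d + (cs.count 'D' : Int)) := by
  induction cs with
  | nil => intro r l u d; simp
  | cons c t ih =>
    intro r l u d
    simp only [List.foldl_cons, solveStepB, List.count_cons]
    split_ifs with h1 h2 h3 h4 <;> rw [ih] <;> subst_eqs <;> simp_all <;> omega

theorem foldl_step2' (x y l : Int) :
    ∀ (n : Nat) (b1 b2 : Bool) (r u : Int),
      (PySem.List.pyRange 0 (n : Int) 1).foldl (solveStep2 x y l) (b1, b2, r, u) =
        (b1 || decide (x + l ≤ r ∧ r - (n : Int) < x + l),
         b2 || decide (y + l ≤ u ∧ u - (n : Int) < y + l),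
         r - (n : Int), u - (n : Int)) := by
  intro n
  induction n with
  | zero =>
    intro b1 b2 r u
    rw [PySem.List.pyRange_one_eq_nil (by omega)]
    simp
  | succ m ih =>
    intro b1 b2 r u
    have h : ((m + 1 : Nat) : Int) = (m : Int) + 1 := by push_cast; ring
    rw [h, PySem.List.pyRange_one_succ_right (by omega), List.foldl_append, ih]
    simp only [List.foldl_cons, List.foldl_nil, solveStep2]
    refine Prod.ext ?_ (Prod.ext ?_ (Prod.ext ?_ ?_)) <;> simp <;> try omega
    · cases b1 <;> simp
      rw [← Bool.decide_and, ← Bool.decide_and, ← Bool.decide_or, decide_eq_decide]; omega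
    · cases b2 <;> simp
      rw [← Bool.decide_and, ← Bool.decide_and, ← Bool.decide_or, decide_eq_decide]; omega

-- ===== VERDICT (by name: the statements are the Claim_ definitions above) =====
theorem solve_spec : Claim_unchanged_solve := by
  intro x y s _ hD
  unfold D_solve pvIn pvC at hD
  unfold solve solve_alt
  simp only [PySem.Str.len_eq, foldl_stepA, foldl_stepB, foldl_step2']
  split_ifs with h1 h2 h3 <;> try rfl
  all_goals exfalso
  all_goals simp only [Bool.false_or, decide_eq_true_eq] at *
  all_goals omega

theorem solve_changed : Claim_changed_solve := by
  unfold Claim_changed_solve; decide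

theorem solve_tight : Claim_exact_solve := by
  intro x y s _ hD
  unfold D_solve pvIn pvC at hD
  unfold solve solve_alt
  simp only [PySem.Str.len_eq, foldl_stepA, foldl_stepB, foldl_step2'] at *
  split_ifs with h1 h2 h3 <;> try simp only [ne_eq, String.reduceEq, not_false_eq_true]
  all_goals exfalso
  all_goals simp only [Bool.false_or, decide_eq_true_eq] at *
  all_goals omega
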